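/- PORTED by tools/port_fixed.py from Prog/Jsmn/S/ParseComma.lean to THE FIXED IMAGE fixed/jsmn_s.bin (same bytes at the same addresses; binFSc). Do not edit: edit the original and port again. -/
/-
  jsmn_s.bin: `jsmn_parse`, `case ','` (1004D2H – 1004FCH, 16 instructions, no loop):
  `if (tokens != NULL && toksuper != -1 && tokens[toksuper].type != ARRAY && … != OBJECT) toksuper = tokens[toksuper].parent;`
  = `Jsmn.comma` with parent links. That `tokens[toksuper]` is inside the array comes from `Frame.inv` (`TokInv.superLo / superHi / toknext`).
-/
import Prog.Jsmn.Fixed.Specs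
import Prog.Jsmn.Fixed.CodeFS
import Prog.Jsmn.Fixed.S.ScanLemmas
namespace X86
namespace J6
namespace FS
open X86.User (CodeAt RegsKept Span FlagsOK Layout toNat_add_ofNat toNat_ofNat_lt' add_ofNat_add)
open Jsmn JsmnFSBytes

set_option maxRecDepth 100000
set_option maxHeartbeats 4000000
set_option linter.unusedSimpArgs false
set_option linter.unusedVariables false

/-! ### The model side -/

theorem body_comma (js : List UInt8) (fuel n : Nat) (s : St) : body Config.strictLinks js fuel n s 0x2c = some (comma Config.strictLinks s) := by
  simp [body]

theorem comma_none {s : St} (hts : s.toks = none) : comma Config.strictLinks s = .next s := by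
  simp [comma, hts]

/-- No superior token, or the superior token is an array or an object: nothing changes. -/
theorem comma_skip {s : St} {ts : Tokens} (hts : s.toks = some ts)
    (h : s.p.toksuper = -1 ∨ (tokAt ts s.p.toksuper).type = 2 ∨ (tokAt ts s.p.toksuper).type = 1) : comma Config.strictLinks s = .next s := by
  simp only [comma, hts, JSMN_ARRAY, JSMN_OBJECT]
  rw [if_neg]
  simp only [Bool.and_eq_true, bne_iff_ne, ne_eq, not_and, Decidable.not_not]
  rintro ⟨h1, h2⟩
  rcases h with h | h | h
  · exact absurd h h1
  · exact absurd h h2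
  · exact h

/-- The superior token is a string or a primitive (a key, or a value after its key): up one parent link. -/
theorem comma_up {s : St} {ts : Tokens} (hts : s.toks = some ts) (h1 : s.p.toksuper ≠ -1) (h2 : (tokAt ts s.p.toksuper).type ≠ 2)
    (h3 : (tokAt ts s.p.toksuper).type ≠ 1) :
    comma Config.strictLinks s = .next { s with p := { s.p with toksuper := (tokAt ts s.p.toksuper).parent } } := by
  simp only [comma, hts, JSMN_ARRAY, JSMN_OBJECT, links_strictLinks]
  rw [if_pos (by simp [h1, h2, h3])]
  simp

/-! ### The region -/

/-- **1004D2H → 100486H: `case ','` computes `Jsmn.comma`.** -/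
theorem comma_reach (sf : SafeFacts binFSc.cfg) {n : User.Layout} {c : PCtx} {v0 v : User.State} {s : St} {ch : UInt8} {fuel : Nat} (hch : ch = 0x2c)
    (hc : AtCase c n v0 v s 0x1004d2 ch) : Reach n v (fun v' => Outcome c n v0 v' (body Config.strictLinks c.js fuel c.numTokens s ch)) := by
  subst hch
  have hf := hc.frame
  have hsafe := (sf.body c.js fuel c.numTokens s 0x2c hf.inv hf.cnt).1
  rw [binFSc_cfg, body_comma] at hsafe
  rw [body_comma]
  obtain ⟨p, toks, count⟩ := s
  have hfc := hf.core
  have hcode := hfc.code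
  have henv := hfc.entry.pre.env
  have hcall := hfc.entry.pre.call
  have hrip := hc.rip
  have hW := hfc.entry.pre.toksW
  v3_open hf henv hcall hW
  j6f_bin
  cases toks with
  | none =>
    -- counting mode: nothing to do
    have htb : c.tb = 0 := hf_core_toksArg
    rw [comma_none rfl]
    v3_walk hcode hcall.fetch [] until [0x100486]
    exact Reach.done ⟨by simp, hf.of_kept (by simp) (by v3_kept)⟩
  | some ts =>
    have htl := hfc.tlen_some
    obtain ⟨htb, hlen, htoks⟩ := hf_core_toksArg
    simp only [PCtx.tlen, htl, dataWins] at *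
    have hR := hfc.entry.pre.env.toksR.resolve_left htb
    v3_open hR
    j6f_bin
    have htinv := hf.inv.toks ts rfl
    have hsmall := htinv.small
    have htn : p.toknext ≤ c.numTokens := htinv.toknext
    have hlo : -1 ≤ p.toksuper := htinv.superLo
    have hhi := htinv.superHi
    simp only [links_strictLinks, if_true] at hhi
    obtain ⟨hraw, -, -⟩ := hf_core_parser_toksuper
    by_cases hsup : p.toksuper = -1
    · -- no superior token
      rw [comma_skip rfl (Or.inl hsup)]
      rw [hsup, show u32 (-1) = 4294967295 by unfold u32; omega] at hraw
      v3_walk hcode hcall.fetch [] until [0x100486]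
      exact Reach.done ⟨by simp, hf.of_kept (by simp) (by v3_kept)⟩
    · obtain ⟨k, hk⟩ : ∃ k : Nat, p.toksuper = k := ⟨p.toksuper.toNat, by omega⟩
      have hkn : k < c.numTokens := by omega
      rw [hk, u32_nat k (by omega)] at hraw
      have htk : tokAt ts p.toksuper = ts.getD k default := by rw [hk]; exact tokAt_nat ts k
      have ht := htoks.getD k (by omega)
      rw [tokAddr20] at ht
      have hty := ht.type
      have hty32 : (ts.getD k default).type < 2 ^ 32 := hty ▸ User.Mem.readLE4_lt _ _
      have hpar := ht.parent rfl
      obtain ⟨hrp, hp1, hp2⟩ := hpar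
      have hu3 := u32_lt (ts.getD k default).parent
      have hsx := Word.sext32_ofNat_of_lt k (by omega)
      have hlea := lea20_ofNat k (by omega)
      v3_walk hcode hcall.fetch [hsx, hlea] until [0x100486]
      · -- the superior token is an array
        rw [comma_skip rfl (Or.inr (Or.inl (by rw [htk]; v3_omega)))]
        exact Reach.done ⟨by simp, hf.of_kept (by simp) (by v3_kept)⟩
      · -- the superior token is an object
        rw [comma_skip rfl (Or.inr (Or.inr (by rw [htk]; v3_omega)))]
        exact Reach.done ⟨by simp, hf.of_kept (by simp) (by v3_kept)⟩
      · -- a string or a primitive: toksuper = its parent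
        have hcs := comma_up (s := ⟨p, some ts, count⟩) rfl hsup (by rw [htk]; v3_omega) (by rw [htk]; v3_omega)
        rw [hcs] at hsafe ⊢
        have hinv' := (hsafe _ rfl).1
        dsimp only at hinv' ⊢
        rw [htk] at hinv' ⊢
        refine Reach.done ⟨by simp, ⟨?_, by v3_regnorm; exact hf_r12, ⟨hf_cnt_1, hf_cnt_2⟩, hinv'⟩⟩
        refine hfc.store_parser (a := c.pa + 8) (by v3_memnorm; rfl) (by v3_kept) (by v3_omega)
          ⟨by v3_frame hf_core_parser_pos, by v3_frame hf_core_parser_toknext,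
            holds32_read (by v3_read) ⟨?_, hp1, hp2⟩⟩
        v3_omega

/-- `case ','`, as the region statement of Prog/Jsmn/S/ParseInv.lean. -/
theorem comma_spec (sf : SafeFacts binFSc.cfg) (n : User.Layout) : CommaSpec n := fun _ _ _ _ _ _ hch hc _ => comma_reach sf hch hc

end FS
end J6
end X86
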